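-- pv_equiv track=rewrite | github.com/cmspam/hapticctl | hapticctl/__main__.py | next_level
-- ===== SOURCE A (Python) =====
-- def next_level(current: int, levels: list[tuple[str, int]], direction: int) -> tuple[str, int]:
--     """Return the next level up (+1) or down (-1) from current value."""
--     values = [v for _, v in levels]
--     if direction > 0:
--         candidates = [v for v in values if v > current]
--         return levels[values.index(min(candidates))] if candidates else levels[-1]
--     else:
--         candidates = [v for v in values if v < current]
--         return levels[values.index(max(candidates))] if candidates else levels[0]
-- ===== SOURCE B (Python) =====
-- def next_level(current: int, levels: list[tuple[str, int]], direction: int) -> tuple[str, int]: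
--     """Return the next level up (+1) or down (-1) from current value."""
--     best = None
--     if direction > 0:
--         for name, v in levels:
--             if v > current and (best is None or v < best[1]):
--                 best = (name, v)
--         return best if best is not None else levels[-1]
--     else:
--         for name, v in levels:
--             if v < current and (best is None or v > best[1]):
--                 best = (name, v)
--         return best if best is not None else levels[0]
-- ===== Notes on version B (the rewrite author's own statement) =====
-- stated objective: alternative
-- what changed: replaced the four-pass values/filter/min-or-max/index pipeline with one linear scan that keeps a running best (name, value) pair, using strict comparisons so the first extremal occurrence wins exactly as values.index(min/max) does
import Mathlib
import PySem

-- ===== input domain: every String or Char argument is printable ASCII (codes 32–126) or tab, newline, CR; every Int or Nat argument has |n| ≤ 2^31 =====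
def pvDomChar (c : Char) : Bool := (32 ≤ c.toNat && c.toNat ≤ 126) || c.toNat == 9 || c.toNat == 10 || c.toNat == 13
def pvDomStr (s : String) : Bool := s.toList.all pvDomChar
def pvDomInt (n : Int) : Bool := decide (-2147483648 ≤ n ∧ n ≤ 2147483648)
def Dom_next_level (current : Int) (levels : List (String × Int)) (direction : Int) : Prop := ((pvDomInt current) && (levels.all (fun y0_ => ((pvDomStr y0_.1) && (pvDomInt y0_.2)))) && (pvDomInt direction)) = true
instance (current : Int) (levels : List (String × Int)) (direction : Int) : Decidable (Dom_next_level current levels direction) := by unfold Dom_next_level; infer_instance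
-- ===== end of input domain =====

-- B replaces A's four-pass values/filter/min-or-max/index pipeline with one linear scan keeping a running best pair (alternative decomposition, same asymptotic cost).

-- ===== PORT A =====
def next_level (current : Int) (levels : List (String × Int)) (direction : Int) : String × Int :=
  let values := levels.map (fun p => p.2)
  if direction > 0 then
    let candidates := values.filter (fun v => decide (current < v))   -- v > current
    if candidates ≠ [] then
      match PySem.List.min? candidates (fun v => v) with
      | some m =>
        match PySem.List.index? values m with
        | some i => (PySem.List.pyGet? levels (i : Int)).getD ("", 0)
        | none => ("", 0)      -- unreachable: m is an element of values
      | none => ("", 0)        -- unreachable: candidates ≠ []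
    else (PySem.List.pyGet? levels (-1)).getD ("", 0)   -- levels[-1]; none (IndexError) excluded by Pre_
  else
    let candidates := values.filter (fun v => decide (v < current))
    if candidates ≠ [] then
      match PySem.List.max? candidates (fun v => v) with
      | some m =>
        match PySem.List.index? values m with
        | some i => (PySem.List.pyGet? levels (i : Int)).getD ("", 0)
        | none => ("", 0)      -- unreachable
      | none => ("", 0)        -- unreachable
    else (PySem.List.pyGet? levels (0 : Int)).getD ("", 0)   -- levels[0]; none excluded by Pre_

-- ===== PORT B =====
def next_level_alt (current : Int) (levels : List (String × Int)) (direction : Int) : String × Int :=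
  if direction > 0 then
    match levels.foldl (fun best p =>
      match best with
      | none => if current < p.2 then some p else none
      | some b => if current < p.2 ∧ p.2 < b.2 then some p else some b) none with
    | some q => q
    | none => (PySem.List.pyGet? levels (-1)).getD ("", 0)   -- levels[-1]
  else
    match levels.foldl (fun best p =>
      match best with
      | none => if p.2 < current then some p else none
      | some b => if p.2 < current ∧ b.2 < p.2 then some p else some b) none with
    | some q => q
    | none => (PySem.List.pyGet? levels (0 : Int)).getD ("", 0)   -- levels[0]

-- ===== PRECONDITION & SPEC =====
-- Pre_ excludes only levels = [], on which Python A raises IndexError (levels[-1] / levels[0]).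
def Pre_next_level (current : Int) (levels : List (String × Int)) (direction : Int) : Prop := levels ≠ []
instance (current : Int) (levels : List (String × Int)) (direction : Int) : Decidable (Pre_next_level current levels direction) := by unfold Pre_next_level; infer_instance

def pvWitness_next_level : Int × (List (String × Int)) × Int := (5, [("low", 2), ("mid", 5), ("high", 9)], 1)

def Spec_next_level (current : Int) (levels : List (String × Int)) (direction : Int) (out : String × Int) : Prop := out = next_level_alt current levels direction
instance (current : Int) (levels : List (String × Int)) (direction : Int) (out : String × Int) : Decidable (Spec_next_level current levels direction out) := by unfold Spec_next_level; infer_instance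

-- ===== CLAIM (what is proved, stated in full; the proofs are below) =====
def Claim_equal_next_level : Prop := ∀ (current : Int) (levels : List (String × Int)) (direction : Int), Dom_next_level current levels direction → Pre_next_level current levels direction → Spec_next_level current levels direction (next_level current levels direction)

-- ===== LEMMAS AND PROOFS =====

-- Generic "first strictly-better element" machinery, parametric in a strict order R
-- (instantiated with (· < ·) for the up branch and its flip for the down branch).

def pvFoldMin (R : Int → Int → Prop) [DecidableRel R] (acc : Option Int) (xs : List Int) : Option Int :=
  xs.foldl (fun acc x =>
    match acc with
    | none => some x
    | some m => if R x m then some x else some m) acc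

def pvRef (R : Int → Int → Prop) [DecidableRel R] (current : Int) : List (String × Int) → Option (String × Int)
  | [] => none
  | p :: l =>
    if R current p.2 then
      some (match pvRef R current l with
            | none => p
            | some q => if R q.2 p.2 then q else p)
    else pvRef R current l

def pvBFold (R : Int → Int → Prop) [DecidableRel R] (current : Int) (acc : Option (String × Int)) (levels : List (String × Int)) : Option (String × Int) :=
  levels.foldl (fun best p =>
    match best with
    | none => if R current p.2 then some p else none
    | some b => if R current p.2 ∧ R p.2 b.2 then some p else some b) acc

-- shifting the accumulator of the first-extremal fold (min?/max? with a non-empty prefix)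
lemma pvFoldMin_some (R : Int → Int → Prop) [DecidableRel R]
    (htrans : ∀ a b c, R a b → R b c → R a c)
    (hneg : ∀ a b c, ¬ R a b → ¬ R b c → ¬ R a c) :
    ∀ (xs : List Int) (a : Int),
      pvFoldMin R (some a) xs =
        some (match pvFoldMin R none xs with
              | none => a
              | some m => if R m a then m else a) := by
  intro xs
  induction xs with
  | nil => intro a; rfl
  | cons x xs ih =>
    intro a
    have hnone : pvFoldMin R none (x :: xs) = pvFoldMin R (some x) xs := rfl
    by_cases hxa : R x a
    · have : pvFoldMin R (some a) (x :: xs) = pvFoldMin R (some x) xs := by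
        simp [pvFoldMin, List.foldl, hxa]
      rw [this, hnone, ih x]
      rcases h : pvFoldMin R none xs with _ | m
      · simp [hxa]
      · by_cases hmx : R m x
        · simp [hmx, htrans m x a hmx hxa]
        · simp [hmx, hxa]
    · have : pvFoldMin R (some a) (x :: xs) = pvFoldMin R (some a) xs := by
        simp [pvFoldMin, List.foldl, hxa]
      rw [this, hnone, ih a, ih x]
      rcases h : pvFoldMin R none xs with _ | m
      · simp [hxa]
      · by_cases hmx : R m x
        · simp [hmx]
        · simp [hmx, hxa, hneg m x a hmx hxa]

-- B's single scan computes pvRef (generalized over the accumulator)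
lemma pvBFold_eq (R : Int → Int → Prop) [DecidableRel R] (current : Int)
    (htrans : ∀ a b c, R a b → R b c → R a c)
    (hneg : ∀ a b c, ¬ R a b → ¬ R b c → ¬ R a c) :
    ∀ (levels : List (String × Int)) (acc : Option (String × Int)),
      pvBFold R current acc levels =
        match acc with
        | none => pvRef R current levels
        | some b =>
          some (match pvRef R current levels with
                | none => b
                | some q => if R q.2 b.2 then q else b) := by
  intro levels
  induction levels with
  | nil => intro acc; rcases acc with _ | b <;> rfl
  | cons p l ih =>
    intro acc
    rcases acc with _ | b
    · by_cases hc : R current p.2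
      · have h1 : pvBFold R current none (p :: l) = pvBFold R current (some p) l := by
          simp [pvBFold, List.foldl, hc]
        rw [h1, ih (some p)]
        simp [pvRef, hc]
      · have h1 : pvBFold R current none (p :: l) = pvBFold R current none l := by
          simp [pvBFold, List.foldl, hc]
        rw [h1, ih none]
        simp [pvRef, hc]
    · by_cases hc : R current p.2 ∧ R p.2 b.2
      · have h1 : pvBFold R current (some b) (p :: l) = pvBFold R current (some p) l := by
          simp [pvBFold, List.foldl, hc]
        rw [h1, ih (some p)]
        simp only [pvRef, hc.1, if_pos]
        rcases h : pvRef R current l with _ | q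
        · simp [hc.2]
        · by_cases hq : R q.2 p.2
          · simp [hq, htrans q.2 p.2 b.2 hq hc.2]
          · simp [hq, hc.2]
      · have h1 : pvBFold R current (some b) (p :: l) = pvBFold R current (some b) l := by
          simp [pvBFold, List.foldl, hc]
        rw [h1, ih (some b)]
        by_cases hcp : R current p.2
        · have hpb : ¬ R p.2 b.2 := fun h => hc ⟨hcp, h⟩
          simp only [pvRef, hcp, if_pos]
          rcases h : pvRef R current l with _ | q
          · simp [hpb]
          · by_cases hq : R q.2 p.2
            · simp [hq]
            · simp [hq, hpb, hneg q.2 p.2 b.2 hq hpb]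
        · simp [pvRef, hcp]

-- pvRef is exactly what A's pipeline computes: if it is none the candidate filter is
-- empty; if it is some q then q.2 is the first extremal candidate value and q sits at
-- the first index of that value in the list.
lemma pvRef_char (R : Int → Int → Prop) [DecidableRel R] (current : Int)
    (htrans : ∀ a b c, R a b → R b c → R a c)
    (hneg : ∀ a b c, ¬ R a b → ¬ R b c → ¬ R a c)
    (hne : ∀ a b, R a b → a ≠ b) :
    ∀ (levels : List (String × Int)),
      match pvRef R current levels with
      | none => (levels.map (fun p => p.2)).filter (fun v => decide (R current v)) = []
      | some q =>
          R current q.2 ∧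
          pvFoldMin R none ((levels.map (fun p => p.2)).filter (fun v => decide (R current v))) = some q.2 ∧
          ∃ i, List.idxOf? q.2 (levels.map (fun p => p.2)) = some i ∧ levels[i]? = some q := by
  intro levels
  induction levels with
  | nil => simp [pvRef]
  | cons p l ih =>
    by_cases hc : R current p.2
    · simp only [pvRef, hc, if_pos]
      rcases h : pvRef R current l with _ | q
      · rw [h] at ih
        refine ⟨hc, ?_, 0, ?_, rfl⟩
        · simp [hc, ih, pvFoldMin]
        · simp [List.idxOf?, List.findIdx?_cons]
      · rw [h] at ih
        obtain ⟨hq, hmin, i, hidx, hget⟩ := ih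
        by_cases hqp : R q.2 p.2
        · have hne' : (p.2 == q.2) = false := by
            simp only [beq_eq_false_iff_ne]
            exact fun hh => hne q.2 p.2 hqp hh.symm
          refine ⟨by simp [hqp, hq], ?_, i + 1, ?_, by simp [hqp, hget]⟩
          · have : ((p :: l).map (fun p => p.2)).filter (fun v => decide (R current v)) =
                p.2 :: (l.map (fun p => p.2)).filter (fun v => decide (R current v)) := by
              simp [hc]
            rw [this]
            have hstep : pvFoldMin R none (p.2 :: (l.map (fun p => p.2)).filter (fun v => decide (R current v))) =
                pvFoldMin R (some p.2) ((l.map (fun p => p.2)).filter (fun v => decide (R current v))) := rfl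
            rw [hstep, pvFoldMin_some R htrans hneg, hmin]
            simp [hqp]
          · have hpq : p.2 ≠ q.2 := fun hh => hne q.2 p.2 hqp hh.symm
            simp [List.idxOf?_cons, hqp, hpq, hidx]
        · refine ⟨by simp [hqp, hc], ?_, 0, ?_, by simp [hqp]⟩
          · have : ((p :: l).map (fun p => p.2)).filter (fun v => decide (R current v)) =
                p.2 :: (l.map (fun p => p.2)).filter (fun v => decide (R current v)) := by
              simp [hc]
            rw [this]
            have hstep : pvFoldMin R none (p.2 :: (l.map (fun p => p.2)).filter (fun v => decide (R current v))) =
                pvFoldMin R (some p.2) ((l.map (fun p => p.2)).filter (fun v => decide (R current v))) := rfl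
            rw [hstep, pvFoldMin_some R htrans hneg, hmin]
            simp [hqp]
          · simp [hqp, List.idxOf?, List.findIdx?_cons]
    · simp only [pvRef, hc]
      rcases h : pvRef R current l with _ | q
      · rw [h] at ih
        simp [hc, ih]
      · rw [h] at ih
        obtain ⟨hq, hmin, i, hidx, hget⟩ := ih
        have hne' : (p.2 == q.2) = false := by
          simp only [beq_eq_false_iff_ne]
          intro hh; rw [hh] at hc; exact hc hq
        refine ⟨hq, ?_, i + 1, ?_, by simpa using hget⟩
        · simpa [hc] using hmin
        · simp only [List.map_cons, List.idxOf?_cons, hne', hidx]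
          simp

-- one branch of the equivalence, generic in R; cond/min?/max?/the scan are the
-- R-instantiated pvFoldMin / pvBFold (definitional equality checked at the use site)
lemma branch_eq (R : Int → Int → Prop) [DecidableRel R] (current : Int)
    (levels : List (String × Int)) (fallback : String × Int)
    (htrans : ∀ a b c, R a b → R b c → R a c)
    (hneg : ∀ a b c, ¬ R a b → ¬ R b c → ¬ R a c)
    (hne : ∀ a b, R a b → a ≠ b) :
    (if (levels.map (fun p => p.2)).filter (fun v => decide (R current v)) ≠ [] then
      match pvFoldMin R none ((levels.map (fun p => p.2)).filter (fun v => decide (R current v))) with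
      | some m =>
        match PySem.List.index? (levels.map (fun p => p.2)) m with
        | some i => (PySem.List.pyGet? levels (i : Int)).getD ("", 0)
        | none => ("", 0)
      | none => ("", 0)
     else fallback) =
    (match pvBFold R current none levels with
     | some q => q
     | none => fallback) := by
  have hchar := pvRef_char R current htrans hneg hne levels
  rw [pvBFold_eq R current htrans hneg levels none]
  rcases h : pvRef R current levels with _ | q
  · rw [h] at hchar
    simp [hchar]
  · rw [h] at hchar
    obtain ⟨hq, hmin, i, hidx, hget⟩ := hchar
    have hcand : (levels.map (fun p => p.2)).filter (fun v => decide (R current v)) ≠ [] := by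
      intro he
      rw [he] at hmin
      simp [pvFoldMin] at hmin
    rw [if_pos hcand, hmin]
    simp [PySem.List.index?_eq_idxOf?, hidx, PySem.List.pyGet?_natCast, hget]

-- definitional bridges between the ports' concrete folds and the generic machinery
lemma min?_eq_pvFoldMin (xs : List Int) :
    PySem.List.min? xs (fun v => v) = pvFoldMin (fun a b : Int => a < b) none xs := by
  unfold pvFoldMin PySem.List.min?
  congr 1
  funext acc x
  cases acc <;> rfl

lemma max?_eq_pvFoldMin (xs : List Int) :
    PySem.List.max? xs (fun v => v) = pvFoldMin (fun a b : Int => b < a) none xs := by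
  unfold pvFoldMin PySem.List.max?
  congr 1
  funext acc x
  cases acc <;> rfl

lemma bfold_up_eq (current : Int) (levels : List (String × Int)) :
    levels.foldl (fun best p =>
      match best with
      | none => if current < p.2 then some p else none
      | some b => if current < p.2 ∧ p.2 < b.2 then some p else some b) none =
    pvBFold (fun a b : Int => a < b) current none levels := by
  unfold pvBFold
  congr 1

lemma bfold_down_eq (current : Int) (levels : List (String × Int)) :
    levels.foldl (fun best p =>
      match best with
      | none => if p.2 < current then some p else none
      | some b => if p.2 < current ∧ b.2 < p.2 then some p else some b) none =
    pvBFold (fun a b : Int => b < a) current none levels := by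
  unfold pvBFold
  congr 1

-- ===== VERDICT (by name: the statement is the Claim_ definition above) =====
theorem next_level_spec : Claim_equal_next_level := by
  intro current levels direction _ hpre
  unfold Spec_next_level next_level next_level_alt
  by_cases hd : direction > 0
  · simp only [if_pos hd]
    rw [min?_eq_pvFoldMin, bfold_up_eq]
    have := branch_eq (fun a b : Int => a < b) current levels
      ((PySem.List.pyGet? levels (-1)).getD ("", 0))
      (fun a b c h1 h2 => lt_trans h1 h2)
      (fun a b c h1 h2 h3 => by omega)
      (fun a b h => ne_of_lt h)
    exact this
  · simp only [if_neg hd]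
    rw [max?_eq_pvFoldMin, bfold_down_eq]
    have := branch_eq (fun a b : Int => b < a) current levels
      ((PySem.List.pyGet? levels (0 : Int)).getD ("", 0))
      (fun a b c h1 h2 => lt_trans h2 h1)
      (fun a b c h1 h2 h3 => by omega)
      (fun a b h => ne_of_gt h)
    exact this
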